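-- pv_equiv track=rewrite | github.com/alsrua7222/BOJ_Algorithm_Study | Codeforces/1742/G.py | solve
-- ===== SOURCE A (Python) =====
-- from collections import deque
--
-- def solve(n, arr):
--     idx = n - 1
--     sort = deque(sorted(list([v, v] for v in arr)))
--     bit = 0
--     answer = []
--     for i in range(n):
--         answer.append(sort[-1][1])
--         flag = False
--         for j in range(30):
--             if (bit >> j) & 1 == 0 and (sort[-1][1] >> j) & 1 == 1:
--                 for k in range(len(sort)):
--                     sort[k][0] &= (2147483647 ^ (1 << j))
--                 flag = True
--         bit = bit | sort[-1][1]
--         sort.pop()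
--         if flag:
--             sort = deque(sorted(sort))
--     return answer
-- ===== SOURCE B (Python) =====
-- def solve(n, arr):
--     # Plain list + one argmax scan per output element; no pair deque, no masking
--     # sweep over all keys, no re-sorting.  `bit` is the OR of the chosen prefix;
--     # an element's current rank is itself while no bit below 2**30 has been
--     # collected, and (v & (2147483647 ^ low), v) afterwards.
--     rem = list(arr)
--     bit = 0
--     answer = []
--     for _ in range(n):
--         low = bit & 1073741823
--         if low == 0:
--             best = max(rem)
--         else:
--             best = max(rem, key=lambda v: (v & (2147483647 ^ low), v))
--         answer.append(best)
--         bit |= best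
--         rem.remove(best)
--     return answer
-- ===== Notes on version B (the rewrite author's own statement) =====
-- stated objective: simpler
-- what changed: B drops A's deque of [key,value] pairs with its sort-then-incrementally-mask-every-key-and-re-sort strategy and instead keeps a plain list of remaining values plus the OR-accumulator bit, picking each output element by a single argmax scan under the key (v & (2147483647 ^ (bit & 1073741823)), v) (plain v while no bit below 2**30 is collected).
-- outside the precondition, e.g. on solve(2, [5]): A raises IndexError, B raises ValueError
import Mathlib
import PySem

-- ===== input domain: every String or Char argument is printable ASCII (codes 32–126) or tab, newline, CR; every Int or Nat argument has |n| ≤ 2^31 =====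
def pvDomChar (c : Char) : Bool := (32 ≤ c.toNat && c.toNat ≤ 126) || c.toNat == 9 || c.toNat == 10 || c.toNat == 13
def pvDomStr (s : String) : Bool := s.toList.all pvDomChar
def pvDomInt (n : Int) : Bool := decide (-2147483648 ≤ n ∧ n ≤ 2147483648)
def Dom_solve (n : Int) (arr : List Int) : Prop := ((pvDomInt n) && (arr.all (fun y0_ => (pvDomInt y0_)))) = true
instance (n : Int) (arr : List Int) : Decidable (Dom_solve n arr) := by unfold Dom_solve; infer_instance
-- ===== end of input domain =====

-- B replaces A's sorted pair-deque with its 30-bit masking sweep and conditional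
-- re-sort by a plain remaining-values list and one argmax scan per output element.

-- ===== PORT A =====
-- inner 'for j in range(30)' loop: masks every key and sets flag.  The deque of
-- [key, value] pairs is ported as List (Int × Int); Python's list/tuple comparison
-- is the lexicographic order 'toLex' on pairs.  Shift amounts are j.toNat since
-- Lean's Int shifts take a Nat; j ranges over range(30), so j.toNat = j exactly.
def solveInner (bit : Int) (sort : List (Int × Int)) : List (Int × Int) × Bool :=
  (PySem.List.pyRange 0 30 1).foldl (fun st j =>
    if (PySem.Int.band (bit >>> j.toNat) 1 = 0) ∧
       (PySem.Int.band ((PySem.List.pyGetD st.1 (-1) ((0 : Int), (0 : Int))).2 >>> j.toNat) 1 = 1) then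
      (st.1.map (fun p => (PySem.Int.band p.1 (PySem.Int.bxor 2147483647 ((1 : Int) <<< j.toNat)), p.2)), true)
    else st) (sort, false)

-- body of the outer 'for i in range(n)' loop, state (sort, bit, answer)
def solveStep (st : List (Int × Int) × Int × List Int) : List (Int × Int) × Int × List Int :=
  let sort := st.1
  let bit := st.2.1
  let answer := st.2.2 ++ [(PySem.List.pyGetD sort (-1) ((0 : Int), (0 : Int))).2]
  let r := solveInner bit sort
  let bit := PySem.Int.bor bit (PySem.List.pyGetD r.1 (-1) ((0 : Int), (0 : Int))).2
  let sort := r.1.dropLast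
  let sort := if r.2 then PySem.List.sorted sort (fun p => toLex p) false else sort
  (sort, bit, answer)

def solve (n : Int) (arr : List Int) : List Int :=
  let _idx := n - 1
  let sort := PySem.List.sorted (arr.map (fun v => (v, v))) (fun p => toLex p) false
  let final := (PySem.List.pyRange 0 n 1).foldl (fun st _ => solveStep st) (sort, 0, [])
  final.2.2

-- ===== PORT B =====
-- body of B's loop, state (rem, bit, answer); 'max(rem, key=…)' with a tuple key
-- is PySem.List.max? with the lexicographic key 'toLex'
def solveAltStep (st : List Int × Int × List Int) : List Int × Int × List Int :=
  let rem := st.1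
  let bit := st.2.1
  let low := PySem.Int.band bit 1073741823
  let best :=
    if low = 0 then (PySem.List.max? rem (fun v => v)).getD 0
    else (PySem.List.max? rem (fun v => toLex (PySem.Int.band v (PySem.Int.bxor 2147483647 low), v))).getD 0
  ((PySem.List.remove? rem best).getD rem, PySem.Int.bor bit best, st.2.2 ++ [best])

def solve_alt (n : Int) (arr : List Int) : List Int :=
  let final := (PySem.List.pyRange 0 n 1).foldl (fun st _ => solveAltStep st) (arr, 0, [])
  final.2.2

-- ===== PRECONDITION & SPEC =====
-- Pre_ excludes only n > len(arr), where both programs raise (A: IndexError on the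
-- empty deque, B: ValueError from max on the empty list).
def Pre_solve (n : Int) (arr : List Int) : Prop := n ≤ (arr.length : Int)
instance (n : Int) (arr : List Int) : Decidable (Pre_solve n arr) := by unfold Pre_solve; infer_instance
def pvWitness_solve : Int × List Int := (3, [5, 2, 7])

def Spec_solve (n : Int) (arr : List Int) (out : List Int) : Prop := out = solve_alt n arr
instance (n : Int) (arr : List Int) (out : List Int) : Decidable (Spec_solve n arr out) := by unfold Spec_solve; infer_instance

-- ===== CLAIM (what is proved, stated in full; the proofs are below) =====
def Claim_equal_solve : Prop := ∀ (n : Int) (arr : List Int), Dom_solve n arr → Pre_solve n arr → Spec_solve n arr (solve n arr)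

-- ===== LEMMAS AND PROOFS =====

-- ---- generic helpers ----

theorem pvFoldlIterate {α σ : Type} (f : σ → σ) (l : List α) (s : σ) :
    l.foldl (fun s _ => f s) s = f^[l.length] s := by
  induction l generalizing s with
  | nil => rfl
  | cons x t ih => simp [List.foldl_cons, ih, Function.iterate_succ_apply]

theorem pvPyGetDNegOne {α : Type} (xs : List α) (d : α) (h : xs ≠ []) :
    PySem.List.pyGetD xs (-1) d = xs.getLast h := by
  have hl : 0 < xs.length := List.length_pos_of_ne_nil h
  have h1 : PySem.List.pyGet? xs (-1) = xs[xs.length - 1]? := by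
    have := PySem.List.pyGet?_neg xs (i := -1) (by norm_num)
      (by rw [neg_le_neg_iff]; exact_mod_cast hl)
    simpa using this
  have h2 : xs[xs.length - 1]? = some (xs.getLast h) := by
    rw [← List.getLast?_eq_getElem?, List.getLast?_eq_some_getLast (l := xs) h]
  simp [PySem.List.pyGetD, h1, h2]

theorem pvPairwiseLeGetLast {α κ : Type} [LinearOrder κ] (key : α → κ) :
    ∀ (l : List α) (h : l ≠ []) (x : α), x ∈ l →
      l.Pairwise (fun a b => key a ≤ key b) → key x ≤ key (l.getLast h) := by
  intro l
  induction l with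
  | nil => intro h; exact absurd rfl h
  | cons a t ih =>
    intro h x hx hp
    rcases eq_or_ne t ([] : List α) with ht | ht
    · subst ht; simp at hx; subst hx; simp [List.getLast]
    · rw [List.getLast_cons ht]
      rcases List.mem_cons.mp hx with rfl | hx
      · exact List.rel_of_pairwise_cons hp (List.getLast_mem ht)
      · exact ih ht x hx hp.of_cons

-- ---- bitwise toolkit ----

theorem pvSubLand (m n : Nat) : m - (m &&& n) = m.ldiff n := by
  induction m using Nat.strong_induction_on generalizing n with
  | _ m ih =>
    rcases Nat.eq_zero_or_pos m with hm | hm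
    · subst hm
      simp [Nat.ldiff, Nat.bitwise_zero_left]
    · have hdiv : m / 2 < m := Nat.div_lt_self hm (by norm_num)
      have ihp := ih (m / 2) hdiv (n / 2)
      have hA2 : (m &&& n) / 2 = (m / 2) &&& (n / 2) := Nat.and_div_two
      have hL2 : (m.ldiff n) / 2 = (m / 2).ldiff (n / 2) := by
        simpa using Nat.bitwise_div_two_pow (f := fun a b => a && !b) (n := 1) (x := m) (y := n)
      have hA1 : (m &&& n) % 2 = (m % 2) &&& (n % 2) := by
        simpa using Nat.and_mod_two_pow (a := m) (b := n) (n := 1)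
      have hL1 : (m.ldiff n) % 2 = (m % 2).ldiff (n % 2) := by
        simpa using Nat.bitwise_mod_two_pow (f := fun a b => a && !b) (n := 1) (x := m) (y := n)
      have l0 : ∀ b : Nat, Nat.ldiff 0 b = 0 := fun b =>
        Nat.eq_of_testBit_eq fun k => by simp [Nat.testBit_ldiff]
      have l10 : Nat.ldiff 1 0 = 1 :=
        Nat.eq_of_testBit_eq fun k => by simp [Nat.testBit_ldiff]
      have l11 : Nat.ldiff 1 1 = 0 :=
        Nat.eq_of_testBit_eq fun k => by simp [Nat.testBit_ldiff]
      obtain ⟨hs1, hs2⟩ : ((m % 2) &&& (n % 2)) + (m % 2).ldiff (n % 2) = m % 2 ∧ ((m % 2) &&& (n % 2)) ≤ m % 2 := by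
        rcases Nat.mod_two_eq_zero_or_one m with h1 | h1 <;>
          rcases Nat.mod_two_eq_zero_or_one n with h2 | h2 <;>
            simp [h1, h2, Nat.zero_and, Nat.and_zero, Nat.and_self, l0, l10, l11]
      have hxle : (m / 2) &&& (n / 2) ≤ m / 2 := Nat.and_le_left
      omega

theorem pvNegSuccAux (n : Nat) : (-(Int.negSucc n) - 1).toNat = n := by
  rw [Int.negSucc_eq]; omega

theorem pvBandEq (a b : Int) : PySem.Int.band a b = Int.land a b := by
  cases a with
  | ofNat m =>
    cases b with
    | ofNat n => simp [PySem.Int.band, Int.land]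
    | negSucc n =>
      simp [PySem.Int.band, Int.land, Int.negSucc_lt_zero, pvNegSuccAux,
        (by omega : ¬ (0:Int) ≤ Int.negSucc n), pvSubLand]
  | negSucc m =>
    cases b with
    | ofNat n =>
      simp [PySem.Int.band, Int.land, pvNegSuccAux,
        (by omega : ¬ (0:Int) ≤ Int.negSucc m), pvSubLand]
    | negSucc n =>
      simp [PySem.Int.band, Int.land, pvNegSuccAux,
        (by omega : ¬ (0:Int) ≤ Int.negSucc m), (by omega : ¬ (0:Int) ≤ Int.negSucc n)]
      rw [Int.negSucc_eq]; push_cast; ring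

theorem pvBorEq (a b : Int) : PySem.Int.bor a b = Int.lor a b := by
  cases a with
  | ofNat m =>
    cases b with
    | ofNat n => simp [PySem.Int.bor, Int.lor]
    | negSucc n =>
      simp [PySem.Int.bor, Int.lor, pvNegSuccAux,
        (by omega : ¬ (0:Int) ≤ Int.negSucc n), pvSubLand]
      rw [Int.negSucc_eq]; push_cast [pvSubLand]; ring
  | negSucc m =>
    cases b with
    | ofNat n =>
      simp [PySem.Int.bor, Int.lor, pvNegSuccAux,
        (by omega : ¬ (0:Int) ≤ Int.negSucc m), pvSubLand]
      rw [Int.negSucc_eq]; push_cast [pvSubLand]; ring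
    | negSucc n =>
      simp [PySem.Int.bor, Int.lor, pvNegSuccAux,
        (by omega : ¬ (0:Int) ≤ Int.negSucc m), (by omega : ¬ (0:Int) ≤ Int.negSucc n)]
      rw [Int.negSucc_eq]; push_cast; ring

theorem pvBxorEq (a b : Int) : PySem.Int.bxor a b = Int.xor a b := by
  cases a with
  | ofNat m =>
    cases b with
    | ofNat n => simp [PySem.Int.bxor, Int.xor]
    | negSucc n =>
      simp [PySem.Int.bxor, Int.xor, pvNegSuccAux, (by omega : ¬ (0:Int) ≤ Int.negSucc n)]
      rw [Int.negSucc_eq]; push_cast; ring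
  | negSucc m =>
    cases b with
    | ofNat n =>
      simp [PySem.Int.bxor, Int.xor, pvNegSuccAux, (by omega : ¬ (0:Int) ≤ Int.negSucc m)]
      rw [Int.negSucc_eq]; push_cast; ring
    | negSucc n =>
      simp [PySem.Int.bxor, Int.xor, pvNegSuccAux,
        (by omega : ¬ (0:Int) ≤ Int.negSucc m), (by omega : ¬ (0:Int) ≤ Int.negSucc n)]

theorem pvTbHigh (m k : Nat) (h : m ≤ k) : m.testBit k = false := by
  exact Nat.testBit_eq_false_of_lt (lt_of_lt_of_le Nat.lt_two_pow_self (Nat.pow_le_pow_right (by norm_num) h))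

theorem pvIntExt {a b : Int} (h : ∀ k, a.testBit k = b.testBit k) : a = b := by
  cases a with
  | ofNat m =>
    cases b with
    | ofNat n =>
      have : m = n := Nat.eq_of_testBit_eq fun k => by simpa [Int.testBit] using h k
      simp [this]
    | negSucc n =>
      exfalso
      have hk := h (max m n)
      rw [show Int.testBit (Int.ofNat m) (max m n) = m.testBit (max m n) from rfl,
        show Int.testBit (Int.negSucc n) (max m n) = !n.testBit (max m n) from rfl,
        pvTbHigh m _ (le_max_left m n), pvTbHigh n _ (le_max_right m n)] at hk
      simp at hk
  | negSucc m =>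
    cases b with
    | ofNat n =>
      exfalso
      have hk := h (max m n)
      rw [show Int.testBit (Int.negSucc m) (max m n) = !m.testBit (max m n) from rfl,
        show Int.testBit (Int.ofNat n) (max m n) = n.testBit (max m n) from rfl,
        pvTbHigh m _ (le_max_left m n), pvTbHigh n _ (le_max_right m n)] at hk
      simp at hk
    | negSucc n =>
      have : m = n := Nat.eq_of_testBit_eq fun k => by
        have := h k
        simp only [Int.testBit] at this
        exact Bool.not_inj this
      simp [this]

theorem pvTbBand (a b : Int) (k : Nat) : (PySem.Int.band a b).testBit k = (a.testBit k && b.testBit k) := by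
  rw [pvBandEq]; exact Int.testBit_land a b k

theorem pvTbBor (a b : Int) (k : Nat) : (PySem.Int.bor a b).testBit k = (a.testBit k || b.testBit k) := by
  rw [pvBorEq]; exact Int.testBit_lor a b k

theorem pvTbBxor (a b : Int) (k : Nat) : (PySem.Int.bxor a b).testBit k = (a.testBit k ^^ b.testBit k) := by
  rw [pvBxorEq]; exact Int.testBit_lxor a b k

theorem pvTbShr (a : Int) (j k : Nat) : (a >>> j).testBit k = a.testBit (j + k) := by
  cases a with
  | ofNat m =>
    show (Int.ofNat (m >>> j)).testBit k = (Int.ofNat m).testBit (j + k)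
    simp [Int.testBit, Nat.testBit_shiftRight]
  | negSucc m =>
    show (Int.negSucc (m >>> j)).testBit k = (Int.negSucc m).testBit (j + k)
    simp [Int.testBit, Nat.testBit_shiftRight]

theorem pvTbOne (k : Nat) : (1 : Int).testBit k = decide (k = 0) := by
  show (Int.ofNat 1).testBit k = _
  rw [show Int.testBit (Int.ofNat 1) k = Nat.testBit 1 k from rfl,
    show (1 : Nat) = 2 ^ 0 by norm_num, Nat.testBit_two_pow]
  simp [eq_comm]

theorem pvTbZero (k : Nat) : (0 : Int).testBit k = false := by
  show (Int.ofNat 0).testBit k = false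
  simp [Int.testBit]

theorem pvTbNegOne (k : Nat) : (-1 : Int).testBit k = true := by
  show (Int.negSucc 0).testBit k = true
  simp [Int.testBit]

theorem pvTbM (k : Nat) : (2147483647 : Int).testBit k = decide (k < 31) := by
  rw [show (2147483647 : Int) = Int.ofNat 2147483647 from rfl,
    show Int.testBit (Int.ofNat 2147483647) k = Nat.testBit 2147483647 k from rfl,
    show (2147483647 : Nat) = 2 ^ 31 - 1 by norm_num, Nat.testBit_two_pow_sub_one]

theorem pvTbLow (k : Nat) : (1073741823 : Int).testBit k = decide (k < 30) := by
  rw [show (1073741823 : Int) = Int.ofNat 1073741823 from rfl,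
    show Int.testBit (Int.ofNat 1073741823) k = Nat.testBit 1073741823 k from rfl,
    show (1073741823 : Nat) = 2 ^ 30 - 1 by norm_num, Nat.testBit_two_pow_sub_one]

theorem pvTbPow (j k : Nat) : ((1 : Int) <<< j).testBit k = decide (k = j) := by
  rw [show ((1 : Int) <<< j) = Int.ofNat (1 <<< j) from rfl,
    show Int.testBit (Int.ofNat (1 <<< j)) k = Nat.testBit (1 <<< j) k from rfl,
    show (1 <<< j : Nat) = 2 ^ j by simp [Nat.shiftLeft_eq], Nat.testBit_two_pow]
  simp [eq_comm]

theorem pvBandAssoc (a b c : Int) :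
    PySem.Int.band (PySem.Int.band a b) c = PySem.Int.band a (PySem.Int.band b c) := by
  refine pvIntExt fun k => ?_
  simp [pvTbBand, Bool.and_assoc]

theorem pvEqZeroIffTb (a : Int) : a = 0 ↔ ∀ k, a.testBit k = false := by
  constructor
  · intro h k; subst h; exact pvTbZero k
  · intro h; exact pvIntExt fun k => by rw [h k, pvTbZero]

theorem pvBandShrOne (a : Int) (j : Nat) :
    PySem.Int.band (a >>> j) 1 = if a.testBit j then 1 else 0 := by
  refine pvIntExt fun k => ?_
  rw [pvTbBand, pvTbShr, pvTbOne]
  by_cases hj : a.testBit j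
  · rw [if_pos hj, pvTbOne]
    by_cases hk : k = 0
    · subst hk; simp [hj]
    · simp [hk]
  · rw [if_neg hj, pvTbZero]
    by_cases hk : k = 0
    · subst hk; simp [hj]
    · simp [hk]

theorem pvCondZero (a : Int) (j : Nat) :
    (PySem.Int.band (a >>> j) 1 = 0) ↔ a.testBit j = false := by
  rw [pvBandShrOne]
  by_cases hj : a.testBit j <;> simp [hj]

theorem pvCondOne (a : Int) (j : Nat) :
    (PySem.Int.band (a >>> j) 1 = 1) ↔ a.testBit j = true := by
  rw [pvBandShrOne]
  by_cases hj : a.testBit j <;> simp [hj]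

-- ---- A's key bookkeeping ----

def pvKOf (low v : Int) : Int :=
  if low = 0 then v else PySem.Int.band v (PySem.Int.bxor 2147483647 low)

def pvPairOf (bit : Int) (v : Int) : Int × Int := (pvKOf (PySem.Int.band bit 1073741823) v, v)

def pvNewb (bit t : Int) (j : Nat) : Bool := !bit.testBit j && t.testBit j

def pvAmask (bit t : Int) (m : Nat) : Int :=
  (List.range m).foldl
    (fun acc j => if pvNewb bit t j then PySem.Int.band acc (PySem.Int.bxor 2147483647 ((1 : Int) <<< j)) else acc) (-1)

def pvAflag (bit t : Int) (m : Nat) : Bool := decide (∃ j < m, pvNewb bit t j = true)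

theorem pvAmaskSucc (bit t : Int) (m : Nat) :
    pvAmask bit t (m+1) =
      if pvNewb bit t m then PySem.Int.band (pvAmask bit t m) (PySem.Int.bxor 2147483647 ((1 : Int) <<< m))
      else pvAmask bit t m := by
  simp [pvAmask, List.range_succ]

theorem pvAflagSucc (bit t : Int) (m : Nat) :
    pvAflag bit t (m+1) = (pvAflag bit t m || pvNewb bit t m) := by
  have hiff : (∃ j ≤ m, pvNewb bit t j = true) ↔ ((∃ j < m, pvNewb bit t j = true) ∨ pvNewb bit t m = true) := by
    constructor
    · rintro ⟨j, hj, hp⟩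
      rcases lt_or_eq_of_le hj with hlt | heq
      · exact Or.inl ⟨j, hlt, hp⟩
      · subst heq; exact Or.inr hp
    · rintro (⟨j, hj, hp⟩ | hp)
      · exact ⟨j, by omega, hp⟩
      · exact ⟨m, le_refl m, hp⟩
  simp only [pvAflag]
  simp [hiff]

theorem pvTbAmask (bit t : Int) (m k : Nat) (hm : m ≤ 30) :
    (pvAmask bit t m).testBit k =
      (!pvAflag bit t m || (decide (k < 31) && !(decide (k < m) && pvNewb bit t k))) := by
  induction m with
  | zero => simp [pvAmask, pvAflag, pvTbNegOne]
  | succ m ih =>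
    have hmlt : m < 30 := by omega
    rw [pvAmaskSucc, pvAflagSucc]
    cases hnb : pvNewb bit t m with
    | false =>
      rw [if_neg (by simp [hnb]), ih (by omega)]
      simp only [Bool.or_false]
      by_cases hk : k = m
      · subst hk
        simp [hnb]
      · have hdk : decide (k < m+1) = decide (k < m) := decide_eq_decide.mpr (by omega)
        rw [hdk]
    | true =>
      rw [if_pos (by simp [hnb]), pvTbBand, ih (by omega), pvTbBxor, pvTbM, pvTbPow]
      simp only [Bool.or_true, Bool.not_true, Bool.false_or]
      by_cases haf : pvAflag bit t m = true
      · rw [haf]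
        simp only [Bool.not_true, Bool.false_or]
        by_cases hk : k = m
        · subst hk
          simp [hnb, hmlt, Nat.lt_succ_self, show k < 31 by omega, show ¬ k < k by omega]
        · have hdk : decide (k < m+1) = decide (k < m) := decide_eq_decide.mpr (by omega)
          have hdkm : decide (k = m) = false := by simp [hk]
          rw [hdk, hdkm]
          cases hd : decide (k < 31) <;> simp
      · have haf' : pvAflag bit t m = false := by simpa using haf
        have hnof : ∀ j, j < m → pvNewb bit t j = false := by
          intro j hj
          by_contra hcon
          exact haf (by simp [pvAflag]; exact ⟨j, hj, by simpa using hcon⟩)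
        rw [haf']
        simp only [Bool.not_false, Bool.true_or, Bool.true_and]
        by_cases hk : k = m
        · subst hk
          simp [hnb, show k < 31 by omega, Nat.lt_succ_self]
        · have hdk : decide (k < m+1) = decide (k < m) := decide_eq_decide.mpr (by omega)
          have hdkm : decide (k = m) = false := by simp [hk]
          rw [hdk, hdkm]
          by_cases hkm : k < m
          · simp [hnof k hkm, hkm, show k < 31 by omega]
          · simp [hkm]

theorem pvAmaskOfNotFlag (bit t : Int) (h : pvAflag bit t 30 = false) : pvAmask bit t 30 = -1 := by
  refine pvIntExt fun k => ?_
  rw [pvTbAmask bit t 30 k (le_refl 30), pvTbNegOne, h]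
  simp

theorem pvTbLowOf (bit : Int) (k : Nat) :
    (PySem.Int.band bit 1073741823).testBit k = (bit.testBit k && decide (k < 30)) := by
  rw [pvTbBand, pvTbLow]

theorem pvLowZeroIff (bit : Int) :
    PySem.Int.band bit 1073741823 = 0 ↔ ∀ k, k < 30 → bit.testBit k = false := by
  rw [pvEqZeroIffTb]
  constructor
  · intro h k hk
    have := h k
    rw [pvTbLowOf] at this
    simpa [hk] using this
  · intro h k
    rw [pvTbLowOf]
    by_cases hk : k < 30
    · simp [h k hk]
    · simp [hk]

theorem pvAflagIff (bit t : Int) :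
    pvAflag bit t 30 = true ↔ ∃ j, j < 30 ∧ bit.testBit j = false ∧ t.testBit j = true := by
  simp [pvAflag, pvNewb]

-- the masking sweep turns A's key for `bit` into A's key for `bit | t`
theorem pvKeyUpdate (bit t v : Int) :
    PySem.Int.band (pvKOf (PySem.Int.band bit 1073741823) v) (pvAmask bit t 30)
      = pvKOf (PySem.Int.band (PySem.Int.bor bit t) 1073741823) v := by
  by_cases hf : pvAflag bit t 30 = true
  · obtain ⟨j, hj30, hbj, htj⟩ := (pvAflagIff bit t).mp hf
    by_cases hl : PySem.Int.band bit 1073741823 = 0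
    · have hb0 : ∀ k, k < 30 → bit.testBit k = false := (pvLowZeroIff bit).mp hl
      have hl' : PySem.Int.band (PySem.Int.bor bit t) 1073741823 ≠ 0 := by
        intro hC
        have := (pvLowZeroIff _).mp hC j hj30
        rw [pvTbBor] at this
        simp [htj] at this
      unfold pvKOf
      rw [if_pos hl, if_neg hl']
      refine pvIntExt fun k => ?_
      simp only [pvTbBand, pvTbAmask bit t 30 k (le_refl 30), hf, pvTbBxor, pvTbM, pvTbLow, pvTbBor]
      by_cases h30 : k < 30
      · simp [hb0 k h30, h30, show k < 31 by omega, pvNewb]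
      · by_cases h31 : k < 31
        · simp [h30, h31]
        · simp [h30, h31]
    · have hl' : PySem.Int.band (PySem.Int.bor bit t) 1073741823 ≠ 0 := by
        intro hC
        apply hl
        rw [pvLowZeroIff]
        intro k hk
        have := (pvLowZeroIff _).mp hC k hk
        rw [pvTbBor] at this
        cases hbk : bit.testBit k
        · rfl
        · simp [hbk] at this
      unfold pvKOf
      rw [if_neg hl, if_neg hl']
      refine pvIntExt fun k => ?_
      simp only [pvTbBand, pvTbAmask bit t 30 k (le_refl 30), hf, pvTbBxor, pvTbM, pvTbLow, pvTbBor]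
      by_cases h30 : k < 30
      · cases hbk : bit.testBit k <;> cases htk : t.testBit k <;>
          simp [h30, show k < 31 by omega, pvNewb, hbk, htk]
      · by_cases h31 : k < 31
        · simp [h30, h31]
        · simp [h30, h31]
  · have hf' : pvAflag bit t 30 = false := by simpa using hf
    have hnof : ∀ j, j < 30 → pvNewb bit t j = false := by
      intro j hj
      by_contra hcon
      exact hf (by simp [pvAflag]; exact ⟨j, hj, by simpa using hcon⟩)
    have hLL : PySem.Int.band (PySem.Int.bor bit t) 1073741823 = PySem.Int.band bit 1073741823 := by
      refine pvIntExt fun k => ?_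
      rw [pvTbLowOf, pvTbLowOf, pvTbBor]
      by_cases h30 : k < 30
      · have hnk := hnof k h30
        simp only [pvNewb] at hnk
        cases hbk : bit.testBit k
        · simp [hbk] at hnk
          simp [hbk, hnk]
        · simp [hbk]
      · simp [h30]
    rw [pvAmaskOfNotFlag bit t hf', hLL, PySem.Int.band_neg_one]

theorem pvMapNe {α β : Type} (f : α → β) (l : List α) (h : l ≠ []) : l.map f ≠ [] := by
  simpa using h

theorem pvGetLastMap {α β : Type} (f : α → β) (l : List α) (h : l ≠ []) :
    (l.map f).getLast (pvMapNe f l h) = f (l.getLast h) := by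
  have h1 : some ((l.map f).getLast (pvMapNe f l h)) = some (f (l.getLast h)) := by
    rw [← List.getLast?_eq_some_getLast, List.getLast?_map, List.getLast?_eq_some_getLast (l := l) h]
    rfl
  exact Option.some.inj h1

theorem pvShrIntNat (a : Int) (n : Nat) : a >>> ((n : Int)) = a >>> n := by
  cases a <;> cases n <;> rfl

theorem pvShlIntNat (a : Int) (n : Nat) : a <<< ((n : Int)) = a <<< n :=
  Int.shiftLeft_natCast_right a n

theorem pvInnerAux (bit t : Int) (sort : List (Int × Int)) (h : sort ≠ [])
    (ht : (sort.getLast h).2 = t) (m : Nat) :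
    (PySem.List.pyRange 0 (m : Int) 1).foldl
      (fun st j =>
        if (PySem.Int.band (bit >>> j.toNat) 1 = 0) ∧
           (PySem.Int.band ((PySem.List.pyGetD st.1 (-1) ((0 : Int), (0 : Int))).2 >>> j.toNat) 1 = 1) then
          (st.1.map (fun p => (PySem.Int.band p.1 (PySem.Int.bxor 2147483647 ((1 : Int) <<< j.toNat)), p.2)), true)
        else st) (sort, false)
      = (sort.map (fun p => (PySem.Int.band p.1 (pvAmask bit t m), p.2)), pvAflag bit t m) := by
  induction m with
  | zero =>
    rw [show ((0 : Nat) : Int) = 0 by norm_num, PySem.List.pyRange_one_eq_nil (le_refl 0)]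
    simp [pvAmask, pvAflag, PySem.Int.band_neg_one]
  | succ m ih =>
    have hcast : ((m + 1 : Nat) : Int) = (m : Int) + 1 := by push_cast; ring
    rw [hcast, PySem.List.pyRange_one_succ_right (by positivity), List.foldl_append, ih]
    simp only [List.foldl_cons, List.foldl_nil]
    have hmapne : sort.map (fun p => (PySem.Int.band p.1 (pvAmask bit t m), p.2)) ≠ [] :=
      pvMapNe _ _ h
    have hget : (PySem.List.pyGetD
        (sort.map (fun p => (PySem.Int.band p.1 (pvAmask bit t m), p.2))) (-1) ((0 : Int), (0 : Int))).2 = t := by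
      rw [pvPyGetDNegOne _ _ hmapne, pvGetLastMap _ _ h, ht]
    rw [hget]
    simp only [Int.toNat_natCast, pvShrIntNat, pvShlIntNat]
    by_cases hc : bit.testBit m = false ∧ t.testBit m = true
    · rw [if_pos (by rw [pvCondZero, pvCondOne]; exact hc)]
      have hnb : pvNewb bit t m = true := by simp [pvNewb, hc.1, hc.2]
      rw [pvAmaskSucc, pvAflagSucc, if_pos hnb, hnb]
      simp only [List.map_map, Bool.or_true]
      refine congrArg (fun l => (l, true)) ?_
      refine List.map_congr_left fun p _ => ?_
      simp [Function.comp, pvBandAssoc]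
    · rw [if_neg (by rw [pvCondZero, pvCondOne]; exact hc)]
      have hnb : pvNewb bit t m = false := by
        simp only [pvNewb]
        cases hb : bit.testBit m with
        | false =>
          cases hτ : t.testBit m with
          | false => rfl
          | true => exact absurd ⟨hb, hτ⟩ hc
        | true => rfl
      rw [pvAmaskSucc, pvAflagSucc, if_neg (by simp [hnb]), hnb]
      simp

-- the inner 'for j in range(30)' loop, characterised
set_option maxRecDepth 4000 in
theorem pvInnerEq (bit : Int) (sort : List (Int × Int)) (h : sort ≠ []) :
    solveInner bit sort =
      (sort.map (fun p => (PySem.Int.band p.1 (pvAmask bit ((sort.getLast h).2) 30), p.2)),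
       pvAflag bit ((sort.getLast h).2) 30) := by
  have haux := pvInnerAux bit ((sort.getLast h).2) sort h rfl 30
  rw [show ((30 : Nat) : Int) = (30 : Int) by norm_num] at haux
  unfold solveInner
  exact haux

-- ---- the coupling invariant ----

def pvInv (a : List (Int × Int) × Int × List Int) (b : List Int × Int × List Int) : Prop :=
  a.2.1 = b.2.1 ∧ a.2.2 = b.2.2 ∧
  a.1.Pairwise (fun p q => toLex p ≤ toLex q) ∧
  a.1.Perm (b.1.map (pvPairOf a.2.1))

theorem pvBestEq (bit : Int) (rem : List Int) (sort : List (Int × Int)) (hne : rem ≠ [])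
    (hperm : sort.Perm (rem.map (pvPairOf bit))) (hs : sort ≠ [])
    (hmax : ∀ v ∈ rem, toLex (pvPairOf bit v) ≤ toLex (sort.getLast hs))
    (htoppair : sort.getLast hs = pvPairOf bit ((sort.getLast hs).2))
    (htmem : (sort.getLast hs).2 ∈ rem) :
    (if PySem.Int.band bit 1073741823 = 0 then (PySem.List.max? rem (fun v => v)).getD 0
     else (PySem.List.max? rem (fun v =>
       toLex (PySem.Int.band v (PySem.Int.bxor 2147483647 (PySem.Int.band bit 1073741823)), v))).getD 0)
      = (sort.getLast hs).2 := by
  by_cases hl : PySem.Int.band bit 1073741823 = 0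
  · rw [if_pos hl]
    have hpair : ∀ v : Int, pvPairOf bit v = (v, v) := fun v => by simp [pvPairOf, pvKOf, hl]
    obtain ⟨mx, hmx⟩ : ∃ mx, PySem.List.max? rem (fun v => v) = some mx := by
      cases hcase : PySem.List.max? rem (fun v => v) with
      | none => exact absurd ((PySem.List.max?_eq_none_iff rem _).mp hcase) hne
      | some mx => exact ⟨mx, rfl⟩
    rw [hmx, Option.getD_some]
    have hmxmem : mx ∈ rem := PySem.List.max?_mem hmx
    have hmxmax : ∀ y ∈ rem, y ≤ mx := PySem.List.max?_isMax hmx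
    have h1 : mx ≤ (sort.getLast hs).2 := by
      have hm1 := hmax mx hmxmem
      rw [htoppair, hpair mx, hpair ((sort.getLast hs).2), Prod.Lex.toLex_le_toLex] at hm1
      rcases hm1 with hlt | ⟨heq, _⟩
      · exact le_of_lt hlt
      · exact le_of_eq heq
    exact le_antisymm h1 (hmxmax _ htmem)
  · rw [if_neg hl]
    have hkey : ∀ v : Int,
        toLex (PySem.Int.band v (PySem.Int.bxor 2147483647 (PySem.Int.band bit 1073741823)), v)
          = toLex (pvPairOf bit v) := fun v => by simp [pvPairOf, pvKOf, hl]
    obtain ⟨mx, hmx⟩ : ∃ mx, PySem.List.max? rem (fun v =>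
        toLex (PySem.Int.band v (PySem.Int.bxor 2147483647 (PySem.Int.band bit 1073741823)), v)) = some mx := by
      cases hcase : PySem.List.max? rem (fun v =>
          toLex (PySem.Int.band v (PySem.Int.bxor 2147483647 (PySem.Int.band bit 1073741823)), v)) with
      | none => exact absurd ((PySem.List.max?_eq_none_iff rem _).mp hcase) hne
      | some mx => exact ⟨mx, rfl⟩
    rw [hmx, Option.getD_some]
    have hmxmem : mx ∈ rem := PySem.List.max?_mem hmx
    have hmxmax := PySem.List.max?_isMax hmx
    have h1 : toLex (pvPairOf bit mx) ≤ toLex (pvPairOf bit ((sort.getLast hs).2)) := by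
      have := hmax mx hmxmem
      rwa [htoppair] at this
    have h2 : toLex (pvPairOf bit ((sort.getLast hs).2)) ≤ toLex (pvPairOf bit mx) := by
      have := hmxmax _ htmem
      rwa [hkey, hkey] at this
    have heq : pvPairOf bit mx = pvPairOf bit ((sort.getLast hs).2) :=
      toLex.injective (le_antisymm h1 h2)
    simpa [pvPairOf] using congrArg Prod.snd heq

theorem pvStep (a : List (Int × Int) × Int × List Int) (b : List Int × Int × List Int)
    (hinv : pvInv a b) (hne : b.1 ≠ []) :
    pvInv (solveStep a) (solveAltStep b) ∧ (solveAltStep b).1.length + 1 = b.1.length := by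
  obtain ⟨sort, bitA, ansA⟩ := a
  obtain ⟨rem, bit, ans⟩ := b
  obtain ⟨hbit, hans, hp, hperm⟩ := hinv
  simp only at hbit hans hp hperm hne
  subst hbit hans
  have hs : sort ≠ [] := by
    intro hE
    rw [hE] at hperm
    have hlen := hperm.length_eq
    simp at hlen
    exact hne (List.length_eq_zero_iff.mp hlen.symm)
  have htopmem : sort.getLast hs ∈ sort := List.getLast_mem hs
  obtain ⟨t0, ht0mem, ht0eq⟩ := List.mem_map.mp (hperm.mem_iff.mp htopmem)
  have htop2 : (sort.getLast hs).2 = t0 := by rw [← ht0eq]; rfl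
  have htoppair : sort.getLast hs = pvPairOf bitA ((sort.getLast hs).2) := by
    rw [htop2, ← ht0eq]
  have htmem : (sort.getLast hs).2 ∈ rem := htop2 ▸ ht0mem
  have hmax : ∀ v ∈ rem, toLex (pvPairOf bitA v) ≤ toLex (sort.getLast hs) := by
    intro v hv
    exact pvPairwiseLeGetLast (fun p : Int × Int => toLex p) sort hs _
      (hperm.mem_iff.mpr (List.mem_map_of_mem hv)) hp
  set t := (sort.getLast hs).2 with htdef
  -- B's step computes (rem.erase t, bit | t, ans ++ [t])
  have hbe := pvBestEq bitA rem sort hne hperm hs hmax htoppair htmem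
  have hB : solveAltStep (rem, bitA, ansA) = (rem.erase t, PySem.Int.bor bitA t, ansA ++ [t]) := by
    simp only [solveAltStep]
    rw [hbe, PySem.List.remove?_eq_some_erase rem t htmem, Option.getD_some]
  -- A's step
  have hget1 : PySem.List.pyGetD sort (-1) ((0 : Int), (0 : Int)) = sort.getLast hs :=
    pvPyGetDNegOne sort _ hs
  have hinner := pvInnerEq bitA sort hs
  have hget2 : (PySem.List.pyGetD (solveInner bitA sort).1 (-1) ((0 : Int), (0 : Int))).2 = t := by
    rw [hinner]
    rw [pvPyGetDNegOne _ _ (pvMapNe _ _ hs), pvGetLastMap _ _ hs]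
  have hA : solveStep (sort, bitA, ansA) =
      ((if pvAflag bitA t 30 then
          PySem.List.sorted ((sort.map (fun p => (PySem.Int.band p.1 (pvAmask bitA t 30), p.2))).dropLast)
            (fun p : Int × Int => toLex p) false
        else (sort.map (fun p => (PySem.Int.band p.1 (pvAmask bitA t 30), p.2))).dropLast),
       PySem.Int.bor bitA t, ansA ++ [t]) := by
    simp only [solveStep]
    rw [hget1, hget2, hinner]
  -- the masked pair map is the new pair map
  have hmf : ∀ v : Int,
      (fun p : Int × Int => (PySem.Int.band p.1 (pvAmask bitA t 30), p.2)) (pvPairOf bitA v)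
        = pvPairOf (PySem.Int.bor bitA t) v := by
    intro v
    simp only [pvPairOf]
    exact congrArg (fun x => (x, v)) (pvKeyUpdate bitA t v)
  have hpermM : (sort.map (fun p : Int × Int => (PySem.Int.band p.1 (pvAmask bitA t 30), p.2))).Perm
      (rem.map (pvPairOf (PySem.Int.bor bitA t))) := by
    have h2 : (rem.map (pvPairOf bitA)).map
        (fun p : Int × Int => (PySem.Int.band p.1 (pvAmask bitA t 30), p.2))
          = rem.map (pvPairOf (PySem.Int.bor bitA t)) := by
      rw [List.map_map]
      exact List.map_congr_left fun v _ => hmf v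
    exact h2 ▸ (hperm.map _)
  have hlastM : (sort.map (fun p : Int × Int => (PySem.Int.band p.1 (pvAmask bitA t 30), p.2))).getLast
      (pvMapNe _ _ hs) = pvPairOf (PySem.Int.bor bitA t) t := by
    rw [pvGetLastMap _ _ hs]
    conv_lhs => rw [htoppair]
    exact hmf t
  have hdecomp : sort.map (fun p : Int × Int => (PySem.Int.band p.1 (pvAmask bitA t 30), p.2))
      = (sort.map (fun p : Int × Int => (PySem.Int.band p.1 (pvAmask bitA t 30), p.2))).dropLast
        ++ [pvPairOf (PySem.Int.bor bitA t) t] := by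
    rw [← hlastM]
    exact (List.dropLast_append_getLast _).symm
  have hpermDrop : ((sort.map (fun p : Int × Int => (PySem.Int.band p.1 (pvAmask bitA t 30), p.2))).dropLast).Perm
      ((rem.erase t).map (pvPairOf (PySem.Int.bor bitA t))) := by
    have hinj : Function.Injective (pvPairOf (PySem.Int.bor bitA t)) := by
      intro x y hxy
      simpa [pvPairOf] using congrArg Prod.snd hxy
    rw [List.map_erase hinj]
    have h3 : ((sort.map (fun p : Int × Int => (PySem.Int.band p.1 (pvAmask bitA t 30), p.2))).erase
        (pvPairOf (PySem.Int.bor bitA t) t)).Perm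
        ((sort.map (fun p : Int × Int => (PySem.Int.band p.1 (pvAmask bitA t 30), p.2))).dropLast) := by
      conv_lhs => rw [hdecomp]
      refine List.Perm.trans ((List.perm_append_singleton _ _).erase _) ?_
      rw [List.erase_cons_head]
    exact h3.symm.trans (hpermM.erase _)
  -- assemble
  refine ⟨⟨?_, ?_, ?_, ?_⟩, ?_⟩
  · rw [hA, hB]
  · rw [hA, hB]
  · rw [hA]
    cases hfl : pvAflag bitA t 30 with
    | false =>
      simp only [if_neg (by simp [hfl] : ¬ (pvAflag bitA t 30 = true))]
      have hmsort : sort.map (fun p : Int × Int => (PySem.Int.band p.1 (pvAmask bitA t 30), p.2)) = sort := by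
        rw [pvAmaskOfNotFlag bitA t hfl]
        simp [PySem.Int.band_neg_one]
      rw [hmsort]
      exact hp.sublist (List.dropLast_sublist _)
    | true =>
      simp only [if_pos (by simp [hfl] : pvAflag bitA t 30 = true)]
      exact PySem.List.sorted_pairwise _ _
  · rw [hA, hB]
    cases hfl : pvAflag bitA t 30 with
    | false =>
      simp only [if_neg (by simp [hfl] : ¬ (pvAflag bitA t 30 = true))]
      exact hpermDrop
    | true =>
      simp only [if_pos (by simp [hfl] : pvAflag bitA t 30 = true)]
      exact (PySem.List.sorted_perm _ _ false).trans hpermDrop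
  · rw [hB]
    have hlen : (rem.erase t).length = rem.length - 1 := List.length_erase_of_mem htmem
    have hpos : 0 < rem.length := List.length_pos_of_ne_nil hne
    simp only [hlen]
    omega

theorem pvIter (k : Nat) :
    ∀ (a : List (Int × Int) × Int × List Int) (b : List Int × Int × List Int),
      pvInv a b → k ≤ b.1.length → pvInv (solveStep^[k] a) (solveAltStep^[k] b) := by
  induction k with
  | zero => intro a b h _; simpa using h
  | succ k ih =>
    intro a b h hk
    have hne : b.1 ≠ [] := by
      intro he; rw [he] at hk; simp at hk
    obtain ⟨h1, h2⟩ := pvStep a b h hne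
    rw [Function.iterate_succ_apply, Function.iterate_succ_apply]
    exact ih _ _ h1 (by omega)

-- ===== VERDICT (by name: the statement is the Claim_ definition above) =====
theorem solve_spec : Claim_equal_solve := by
  intro n arr _ hpre
  show solve n arr = solve_alt n arr
  have hA : solve n arr = (solveStep^[(PySem.List.pyRange 0 n 1).length]
      (PySem.List.sorted (arr.map (fun v => (v, v))) (fun p : Int × Int => toLex p) false, 0, ([] : List Int))).2.2 := by
    show ((PySem.List.pyRange 0 n 1).foldl (fun st _ => solveStep st)
        (PySem.List.sorted (arr.map (fun v => (v, v))) (fun p : Int × Int => toLex p) false, 0, ([] : List Int))).2.2 = _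
    rw [pvFoldlIterate]
  have hB : solve_alt n arr = (solveAltStep^[(PySem.List.pyRange 0 n 1).length]
      (arr, 0, ([] : List Int))).2.2 := by
    show ((PySem.List.pyRange 0 n 1).foldl (fun st _ => solveAltStep st) (arr, 0, ([] : List Int))).2.2 = _
    rw [pvFoldlIterate]
  rw [hA, hB]
  have hlen : (PySem.List.pyRange 0 n 1).length ≤ arr.length := by
    rw [PySem.List.length_pyRange_one]
    unfold Pre_solve at hpre
    omega
  have hinv : pvInv (PySem.List.sorted (arr.map (fun v => (v, v))) (fun p : Int × Int => toLex p) false, 0, ([] : List Int))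
      (arr, 0, ([] : List Int)) := by
    refine ⟨rfl, rfl, PySem.List.sorted_pairwise _ _, ?_⟩
    have hz : (fun v => ((v : Int), v)) = pvPairOf 0 := by
      funext v
      have : PySem.Int.band 0 1073741823 = 0 := by decide
      simp [pvPairOf, pvKOf, this]
    rw [← hz]
    exact PySem.List.sorted_perm (arr.map (fun v => (v, v))) (fun p : Int × Int => toLex p) false
  exact (pvIter (PySem.List.pyRange 0 n 1).length _ _ hinv hlen).2.1
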